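-- pv_equiv track=rewrite | github.com/Introduction-to-Programming-with-Python/Sudoku | code.py | verificar_regiones
-- ===== SOURCE A (Python) =====
-- def verificar_regiones(matriz:list)->bool:
--
--     correcto  = True
--     numeros = []
--     repeticiones = 1
--     cortes = [(0, 3), (3, 6), (6, 10)]
--
--     while repeticiones <= 3:
--         for i in matriz:
--             fila = i
--             for l in cortes:
--                 corte = l
--                 corte_inicial = corte[0]
--                 corte_final = corte[1]
--                 corte = fila[corte_inicial:corte_final]
--                 for t in corte:
--                     numero = t
--                     if numero == 0:
--                         correcto = False
--                         break
--                     else: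
--                         if numero not in numeros:
--                             numeros.append(numero)
--                         else:
--                             correcto = False
--                             break
--             numeros = []
--         repeticiones += 1
--
--     return correcto
-- ===== SOURCE B (Python) =====
-- def verificar_regiones(matriz: list) -> bool:
--     for fila in matriz:
--         seg = fila[:10]
--         if 0 in seg or len(set(seg)) != len(seg):
--             return False
--     return True
-- ===== Notes on version B (the rewrite author's own statement) =====
-- stated objective: simpler
-- what changed: One early-returning pass over the rows: each row's first 10 entries are checked at once with a 0-membership test and a set-cardinality comparison, replacing A's triple repetition of a nested cortes/seen-list/append/break scan.
import Mathlib
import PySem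

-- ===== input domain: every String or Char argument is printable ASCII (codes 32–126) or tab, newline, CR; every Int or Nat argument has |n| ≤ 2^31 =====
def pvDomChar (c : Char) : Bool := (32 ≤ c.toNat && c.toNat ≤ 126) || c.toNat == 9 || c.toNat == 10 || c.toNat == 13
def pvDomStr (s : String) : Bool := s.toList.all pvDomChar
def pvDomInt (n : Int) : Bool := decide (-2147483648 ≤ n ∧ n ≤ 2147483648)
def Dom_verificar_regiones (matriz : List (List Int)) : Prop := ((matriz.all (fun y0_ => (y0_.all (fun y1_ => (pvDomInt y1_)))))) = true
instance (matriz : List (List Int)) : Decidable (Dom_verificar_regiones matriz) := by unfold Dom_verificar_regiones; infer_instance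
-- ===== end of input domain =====

-- B checks each row once, testing the 10-entry prefix for a zero and for duplicates by set cardinality (objective: simpler).

-- ===== PORT A =====
-- the 'for t in corte' loop with its two break sites; state (correcto, numeros)
def pvLoopT : List Int → Bool → List Int → Bool × List Int
  | [], correcto, numeros => (correcto, numeros)
  | t :: rest, correcto, numeros =>
    if t = 0 then (false, numeros)
    else if numeros.contains t then (false, numeros)
    else pvLoopT rest correcto (numeros ++ [t])

def pvCortes : List (Int × Int) := [(0, 3), (3, 6), (6, 10)]

-- one iteration of 'for i in matriz' (the cortes loop, then 'numeros = []')
def pvRowStep (st : Bool × List Int) (fila : List Int) : Bool × List Int :=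
  let st' := pvCortes.foldl
    (fun s l => pvLoopT (PySem.List.slice fila (some l.1) (some l.2)) s.1 s.2) st
  (st'.1, [])

def verificar_regiones (matriz : List (List Int)) : Bool :=
  -- 'while repeticiones <= 3' runs the matrix loop exactly three times
  ((List.range 3).foldl (fun st _ => matriz.foldl pvRowStep st) (true, ([] : List Int))).1

-- ===== PORT B =====
def verificar_regiones_alt : List (List Int) → Bool
  | [] => true
  | fila :: rest =>
    let seg := PySem.List.slice fila none (some 10)
    if seg.contains 0 || !((PySem.Set.ofList seg).length == seg.length) then false
    else verificar_regiones_alt rest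

-- ===== PRECONDITION & SPEC =====
def Spec_verificar_regiones (matriz : List (List Int)) (out : Bool) : Prop := out = verificar_regiones_alt matriz
instance (matriz : List (List Int)) (out : Bool) : Decidable (Spec_verificar_regiones matriz out) := by unfold Spec_verificar_regiones; infer_instance

-- ===== CLAIM (what is proved, stated in full; the proofs are below) =====
def Claim_equal_verificar_regiones : Prop := ∀ (matriz : List (List Int)), Dom_verificar_regiones matriz → Spec_verificar_regiones matriz (verificar_regiones matriz)

-- ===== LEMMAS AND PROOFS =====

-- common reference predicate: the 10-entry prefix of a row is zero-free and duplicate-free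
def pvRowGood (seg : List Int) : Bool := decide ((∀ t ∈ seg, t ≠ 0) ∧ seg.Nodup)

def pvRef (matriz : List (List Int)) : Bool := matriz.all (fun fila => pvRowGood (fila.take 10))

theorem pvLoopT_false (corte : List Int) (numeros : List Int) :
    (pvLoopT corte false numeros).1 = false := by
  induction corte generalizing numeros with
  | nil => rfl
  | cons t rest ih =>
    simp only [pvLoopT]
    split_ifs <;> simp [ih]

theorem pvLoopT_append (xs ys : List Int) (c : Bool) (n : List Int) :
    (pvLoopT (xs ++ ys) c n).1 = (pvLoopT ys (pvLoopT xs c n).1 (pvLoopT xs c n).2).1 := by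
  induction xs generalizing c n with
  | nil => rfl
  | cons t rest ih =>
    simp only [List.cons_append, pvLoopT]
    split_ifs <;> simp [ih, pvLoopT_false]

theorem pvLoopT_spec (seg : List Int) (c : Bool) (numeros : List Int) (h : numeros.Nodup) :
    (pvLoopT seg c numeros).1 = (c && decide ((∀ t ∈ seg, t ≠ 0) ∧ (numeros ++ seg).Nodup)) := by
  induction seg generalizing numeros with
  | nil => simp [pvLoopT, h]
  | cons t rest ih =>
    simp only [pvLoopT]
    by_cases h0 : t = 0
    · simp [h0]
    · by_cases hm : t ∈ numeros
      · have : ¬ (numeros ++ t :: rest).Nodup := by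
          intro hn
          exact (List.disjoint_of_nodup_append hn) hm (List.mem_cons_self ..)
        simp [h0, hm, this]
      · have hn' : (numeros ++ [t]).Nodup := by
          have hd : ∀ a ∈ numeros, ∀ b ∈ [t], a ≠ b := by
            intro a ha b hb
            rw [List.mem_singleton] at hb
            subst hb
            exact fun e => hm (e ▸ ha)
          exact List.nodup_append.mpr ⟨h, List.nodup_singleton t, hd⟩
        rw [if_neg h0, if_neg (by simpa using hm)]
        rw [ih (numeros ++ [t]) hn']
        have : numeros ++ t :: rest = (numeros ++ [t]) ++ rest := by simp
        rw [this]
        congr 1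
        simp only [decide_eq_decide]
        constructor
        · rintro ⟨ha, hb⟩
          refine ⟨fun x hx => ?_, hb⟩
          rcases List.mem_cons.mp hx with rfl | hx
          · exact h0
          · exact ha x hx
        · rintro ⟨ha, hb⟩; exact ⟨fun x hx => ha x (List.mem_cons_of_mem _ hx), hb⟩

theorem pvSlices (fila : List Int) :
    PySem.List.slice fila (some 0) (some 3) ++
      (PySem.List.slice fila (some 3) (some 6) ++ PySem.List.slice fila (some 6) (some 10)) =
    fila.take 10 := by
  have h1 : PySem.List.slice fila (some 0) (some 3) = (fila.drop 0).take 3 := by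
    simpa using PySem.List.slice_natCast fila 0 3
  have h2 : PySem.List.slice fila (some 3) (some 6) = (fila.drop 3).take 3 := by
    simpa using PySem.List.slice_natCast fila 3 6
  have h3 : PySem.List.slice fila (some 6) (some 10) = (fila.drop 6).take 4 := by
    simpa using PySem.List.slice_natCast fila 6 10
  rw [h1, h2, h3]
  rw [show (10 : Nat) = 3 + 7 from rfl, List.take_add]
  rw [show (7 : Nat) = 3 + 4 from rfl, List.take_add]
  simp [List.drop_drop]

theorem pvRowStep_eq (c : Bool) (fila : List Int) :
    pvRowStep (c, []) fila = ((c && pvRowGood (fila.take 10)), []) := by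
  simp only [pvRowStep, pvCortes, List.foldl]
  rw [← pvLoopT_append, ← pvLoopT_append, pvSlices]
  rw [pvLoopT_spec _ _ _ List.nodup_nil]
  simp [pvRowGood]

theorem pvPass (matriz : List (List Int)) (c : Bool) :
    matriz.foldl pvRowStep (c, []) = ((c && pvRef matriz), []) := by
  induction matriz generalizing c with
  | nil => simp [pvRef]
  | cons fila rest ih =>
    simp only [List.foldl, pvRowStep_eq, ih, pvRef, List.all_cons, Bool.and_assoc]

theorem pvA_eq (matriz : List (List Int)) : verificar_regiones matriz = pvRef matriz := by
  simp only [verificar_regiones, show List.range 3 = [0, 1, 2] from rfl, List.foldl, pvPass]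
  simp

theorem pvFoldlAdd_le (xs : List Int) (s : List Int) :
    (xs.foldl PySem.Set.add s).length ≤ s.length + xs.length := by
  induction xs generalizing s with
  | nil => simp
  | cons x xs ih =>
    simp only [List.foldl, List.length_cons]
    have h := ih (PySem.Set.add s x)
    have hl : (PySem.Set.add s x).length ≤ s.length + 1 := by
      simp only [PySem.Set.add]
      split_ifs <;> simp
    omega

theorem pvFoldlAdd_len (xs : List Int) (s : List Int) :
    ((xs.foldl PySem.Set.add s).length = s.length + xs.length) ↔
      (xs.Nodup ∧ ∀ x ∈ xs, x ∉ s) := by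
  induction xs generalizing s with
  | nil => simp
  | cons x xs ih =>
    simp only [List.foldl, List.length_cons]
    by_cases hm : x ∈ s
    · have hadd : PySem.Set.add s x = s := by
        simp only [PySem.Set.add]
        rw [if_pos (by simpa [PySem.Set.contains_iff] using hm)]
      rw [hadd]
      have hle := pvFoldlAdd_le xs s
      constructor
      · intro h; exfalso; omega
      · rintro ⟨_, h2⟩; exact absurd hm (h2 x (List.mem_cons_self ..))
    · have hadd : PySem.Set.add s x = s ++ [x] := by
        simp only [PySem.Set.add]
        rw [if_neg (by simpa [PySem.Set.contains_iff] using hm)]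
      rw [hadd]
      have harith : s.length + (xs.length + 1) = (s ++ [x]).length + xs.length := by
        simp only [List.length_append, List.length_cons, List.length_nil]; omega
      rw [harith, ih]
      simp only [List.nodup_cons]
      constructor
      · rintro ⟨h1, h2⟩
        have hx : x ∉ xs := fun hxx =>
          (h2 x hxx) (List.mem_append.mpr (Or.inr (List.mem_singleton_self x)))
        refine ⟨⟨hx, h1⟩, fun y hy => ?_⟩
        rcases List.mem_cons.mp hy with rfl | hy
        · exact hm
        · exact fun hs => (h2 y hy) (List.mem_append.mpr (Or.inl hs))
      · rintro ⟨⟨hx, h1⟩, h2⟩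
        refine ⟨h1, fun y hy hmem => ?_⟩
        rcases List.mem_append.mp hmem with hys | hyx
        · exact (h2 y (List.mem_cons_of_mem _ hy)) hys
        · have hyx' : y = x := List.mem_singleton.mp hyx
          exact hx (hyx' ▸ hy)

theorem pvSetLen (xs : List Int) :
    ((PySem.Set.ofList xs).length = xs.length) ↔ xs.Nodup := by
  rw [PySem.Set.ofList_eq_foldl]
  simpa using pvFoldlAdd_len xs []

theorem pvAlt_eq (matriz : List (List Int)) : verificar_regiones_alt matriz = pvRef matriz := by
  induction matriz with
  | nil => rfl
  | cons fila rest ih =>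
    have hseg : PySem.List.slice fila none (some 10) = fila.take 10 := by
      simpa using PySem.List.slice_to_natCast fila 10
    simp only [verificar_regiones_alt, hseg, ih, pvRef, List.all_cons]
    by_cases hg : ((∀ t ∈ fila.take 10, t ≠ 0) ∧ (fila.take 10).Nodup)
    · have h0 : ((fila.take 10).contains 0) = false := by
        simpa using fun h => hg.1 0 h rfl
      have hlen : ((PySem.Set.ofList (fila.take 10)).length == (fila.take 10).length) = true := by
        simpa using (pvSetLen (fila.take 10)).mpr hg.2
      have hrg : pvRowGood (fila.take 10) = true := by simp [pvRowGood]; exact hg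
      rw [h0, hlen, hrg]
      simp
    · have hrg : pvRowGood (fila.take 10) = false := by
        simp only [pvRowGood, decide_eq_false_iff_not]; exact hg
      have hcond : ((fila.take 10).contains 0 ||
          !((PySem.Set.ofList (fila.take 10)).length == (fila.take 10).length)) = true := by
        rcases not_and_or.mp hg with h1 | h2
        · push Not at h1
          obtain ⟨t, ht, ht0⟩ := h1
          have : (0 : Int) ∈ fila.take 10 := by rwa [← ht0]
          simp [this]
        · have hne : ¬ (PySem.Set.ofList (fila.take 10)).length = (fila.take 10).length :=
            fun h => h2 ((pvSetLen (fila.take 10)).mp h)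
          simp only [List.length_take] at hne
          simp [hne]
      rw [hcond, hrg]
      simp

-- ===== VERDICT (by name: the statement is the Claim_ definition above) =====
theorem verificar_regiones_spec : Claim_equal_verificar_regiones := by
  intro matriz _
  unfold Spec_verificar_regiones
  rw [pvA_eq, pvAlt_eq]
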